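-- pv_equiv track=rewrite | github.com/ChenDudo/mm32programmer_cmd | interface/read_flash.py | parseFlash
-- ===== SOURCE A (Python) =====
-- def parseFlash(flash: list, addr = 0x08000000, size = 32, state = 1, default = 0xff):
--     if len(flash) == 0:
--         flash = [default for i in range(size * 1024)]
--     flashDict = {}
--     for l in range(0, size * 1024, state * 16):
--         flashDict["0x{:08X}".format(0x08000000 + l)] = []
--
--     minAddr = addr
--     maxAddr = addr + 1024 * size - 1
--
--     data = []
--     for i in range(minAddr, maxAddr + 1, state):
--         index = i - minAddr
--         if state == 1:
--             data.append("{:02X}".format(flash[index]))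
--         elif state == 2:
--             data.append("{:02X}".format(flash[index+1]) + "{:02X}".format(flash[index]))
--         elif state == 4:
--             data.append("{:02X}".format(flash[index+3]) + "{:02X}".format(flash[index+2]) + "{:02X}".format(flash[index+1]) + "{:02X}".format(flash[index]))
--
--     cnt = 0
--     for i in range(0, len(data), 16):
--         key = "0x{:08X}".format(minAddr + 16 * state * cnt)
--         flashDict[key] = data[i: i + 16]
--         cnt += 1
--
--     return flashDict
-- ===== SOURCE B (Python) =====
-- def parseFlash(flash: list, addr = 0x08000000, size = 32, state = 1, default = 0xff):
--     if len(flash) == 0: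
--         flash = [default for i in range(size * 1024)]
--     flashDict = {}
--     for l in range(0, size * 1024, state * 16):
--         flashDict["0x{:08X}".format(0x08000000 + l)] = []
--     if state in (1, 2, 4):
--         nwords = len(range(addr, addr + 1024 * size, state))
--         for cnt in range((nwords + 15) // 16):
--             base = 16 * state * cnt
--             chunk = ["".join("{:02X}".format(flash[base + state * j + b])
--                              for b in range(state - 1, -1, -1))
--                      for j in range(min(16, nwords - 16 * cnt))]
--             flashDict["0x{:08X}".format(addr + 16 * state * cnt)] = chunk
--     return flashDict
-- ===== Notes on version B (the rewrite author's own statement) =====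
-- stated objective: alternative
-- what changed: B drops A's intermediate flat word list and its separate slicing pass: it iterates over chunk indices once, building each 16-word chunk (and the shorter final chunk) directly from the flash bytes and assigning it straight to its address key.
import Mathlib
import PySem

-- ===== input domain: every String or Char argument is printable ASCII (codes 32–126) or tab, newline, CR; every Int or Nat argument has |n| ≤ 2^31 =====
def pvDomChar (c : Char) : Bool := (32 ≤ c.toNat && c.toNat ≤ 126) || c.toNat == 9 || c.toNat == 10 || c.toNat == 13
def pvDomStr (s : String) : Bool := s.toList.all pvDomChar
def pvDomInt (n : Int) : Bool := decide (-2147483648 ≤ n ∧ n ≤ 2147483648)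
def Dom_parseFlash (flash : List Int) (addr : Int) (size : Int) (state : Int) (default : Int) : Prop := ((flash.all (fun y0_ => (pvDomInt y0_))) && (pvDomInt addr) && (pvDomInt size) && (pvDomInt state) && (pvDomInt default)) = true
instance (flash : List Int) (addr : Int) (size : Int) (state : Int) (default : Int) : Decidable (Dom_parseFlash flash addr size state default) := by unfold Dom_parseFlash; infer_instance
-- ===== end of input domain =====

-- B fuses A's two passes (flat word list, then slicing into 16-word chunks) into one
-- direct chunk-building loop; same return value, no speed claim (objective: alternative).

-- Shared port of Python's "{:0wX}".format(n) (both Source A and Source B call this same builtin):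
-- uppercase hex, zero-padded to total width w, the sign counting toward the width. Exact for all ints.
def pfHexDigits (n : Nat) : List Char := (Nat.toDigits 16 n).map Char.toUpper
def pfHexPad (w : Nat) (n : Int) : String :=
  if n < 0 then
    String.ofList ('-' :: (List.replicate (w - 1 - (pfHexDigits (-n).toNat).length) '0' ++ pfHexDigits (-n).toNat))
  else
    String.ofList (List.replicate (w - (pfHexDigits n.toNat).length) '0' ++ pfHexDigits n.toNat)
def pfHex2 (n : Int) : String := pfHexPad 2 n
def pfKey (n : Int) : String := "0x" ++ pfHexPad 8 n

-- ===== PORT A =====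
-- flash[index] is ported as pyGetD (default 0): Python raises IndexError exactly where the
-- index is out of range; those inputs are excluded by Pre_parseFlash.
def parseFlash (flash : List Int) (addr : Int) (size : Int) (state : Int) (default : Int) : List (String × List String) :=
  let flash := if flash.length = 0 then (PySem.List.pyRange 0 (size * 1024) 1).map (fun _ => default) else flash
  let flashDict : PySem.Dict String (List String) :=
    (PySem.List.pyRange 0 (size * 1024) (state * 16)).foldl
      (fun fd l => fd.insert (pfKey (0x08000000 + l)) []) PySem.Dict.empty
  let minAddr := addr
  let maxAddr := addr + 1024 * size - 1
  let data : List String :=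
    (PySem.List.pyRange minAddr (maxAddr + 1) state).foldl (fun data i =>
      let index := i - minAddr
      if state == 1 then
        data ++ [pfHex2 (PySem.List.pyGetD flash index 0)]
      else if state == 2 then
        data ++ [pfHex2 (PySem.List.pyGetD flash (index + 1) 0) ++ pfHex2 (PySem.List.pyGetD flash index 0)]
      else if state == 4 then
        data ++ [pfHex2 (PySem.List.pyGetD flash (index + 3) 0) ++ pfHex2 (PySem.List.pyGetD flash (index + 2) 0) ++ pfHex2 (PySem.List.pyGetD flash (index + 1) 0) ++ pfHex2 (PySem.List.pyGetD flash index 0)]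
      else data) []
  let r :=
    (PySem.List.pyRange 0 ((data.length : Int)) 16).foldl
      (fun (p : PySem.Dict String (List String) × Int) i =>
        (p.1.insert (pfKey (minAddr + 16 * state * p.2)) (PySem.List.slice data (some i) (some (i + 16))), p.2 + 1))
      (flashDict, 0)
  r.1.items

-- ===== PORT B =====
def parseFlash_alt (flash : List Int) (addr : Int) (size : Int) (state : Int) (default : Int) : List (String × List String) :=
  let flash := if flash.length = 0 then (PySem.List.pyRange 0 (size * 1024) 1).map (fun _ => default) else flash
  let flashDict : PySem.Dict String (List String) :=
    (PySem.List.pyRange 0 (size * 1024) (state * 16)).foldl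
      (fun fd l => fd.insert (pfKey (0x08000000 + l)) []) PySem.Dict.empty
  let flashDict :=
    if state == 1 || state == 2 || state == 4 then
      let nwords : Int := ((PySem.List.pyRange addr (addr + 1024 * size) state).length : Int)
      (PySem.List.pyRange 0 (PySem.Int.floordiv (nwords + 15) 16) 1).foldl
        (fun fd cnt =>
          let base := 16 * state * cnt
          let chunk := (PySem.List.pyRange 0 (min 16 (nwords - 16 * cnt)) 1).map (fun j =>
            PySem.Str.join "" ((PySem.List.pyRange (state - 1) (-1) (-1)).map (fun b =>
              pfHex2 (PySem.List.pyGetD flash (base + state * j + b) 0))))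
          fd.insert (pfKey (addr + 16 * state * cnt)) chunk)
        flashDict
    else flashDict
  flashDict.items

-- ===== PRECONDITION & SPEC =====
-- Pre_ excludes exactly the inputs where the Python A raises: state = 0 (ValueError from
-- range(..., 0)) and, for state in {1,2,4} with positive size and a nonempty flash shorter
-- than 1024*size words' worth of bytes, the IndexError from flash[index].
def Pre_parseFlash (flash : List Int) (addr : Int) (size : Int) (state : Int) (default : Int) : Prop :=
  state ≠ 0 ∧ ((state = 1 ∨ state = 2 ∨ state = 4) → 0 < size → flash ≠ [] → 1024 * size ≤ (flash.length : Int))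
instance (flash : List Int) (addr : Int) (size : Int) (state : Int) (default : Int) : Decidable (Pre_parseFlash flash addr size state default) := by unfold Pre_parseFlash; infer_instance
def pvWitness_parseFlash : List Int × Int × Int × Int × Int := ([1, 2], 0, 0, 1, 0)

def Spec_parseFlash (flash : List Int) (addr : Int) (size : Int) (state : Int) (default : Int) (out : List (String × List String)) : Prop := out = parseFlash_alt flash addr size state default
instance (flash : List Int) (addr : Int) (size : Int) (state : Int) (default : Int) (out : List (String × List String)) : Decidable (Spec_parseFlash flash addr size state default out) := by unfold Spec_parseFlash; infer_instance

-- ===== CLAIM (what is proved, stated in full; the proofs are below) =====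
def Claim_equal_parseFlash : Prop := ∀ (flash : List Int) (addr : Int) (size : Int) (state : Int) (default : Int), Dom_parseFlash flash addr size state default → Pre_parseFlash flash addr size state default → Spec_parseFlash flash addr size state default (parseFlash flash addr size state default)

-- ===== LEMMAS AND PROOFS =====

lemma pv_join_one (a : String) : PySem.Str.join "" [a] = a := by
  simp [PySem.Str.join, PySem.Chars.join, List.intercalate]

lemma pv_join_two (a b : String) : PySem.Str.join "" [a, b] = a ++ b := by
  simp [PySem.Str.join, PySem.Chars.join, List.intercalate]

lemma pv_join_four (a b c d : String) : PySem.Str.join "" [a, b, c, d] = a ++ b ++ c ++ d := by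
  simp [PySem.Str.join, PySem.Chars.join, List.intercalate, String.append_assoc]

lemma pv_take_range' (n : Nat) : ∀ (k s : Nat), (List.range' s n).take k = List.range' s (min k n) := by
  induction n with
  | zero => intro k s; simp
  | succ m ih =>
    intro k s
    cases k with
    | zero => simp
    | succ k' =>
      rw [List.range'_succ, List.take_succ_cons, ih k' (s + 1)]
      have : min (k' + 1) (m + 1) = min k' m + 1 := by omega
      rw [this, List.range'_succ]

lemma pv_foldl_counter {β : Type} (G : β → Nat → Int → β) :
    ∀ (M j : Nat) (d : β),
      ((List.range' j M).foldl (fun (p : β × Int) k => (G p.1 k p.2, p.2 + 1)) (d, (j : Int)))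
        = ((List.range' j M).foldl (fun b k => G b k (k : Int)) d, ((j + M : Nat) : Int)) := by
  intro M
  induction M with
  | zero => intro j d; simp
  | succ m ih =>
    intro j d
    rw [List.range'_succ]
    simp only [List.foldl_cons]
    have h1 : ((j : Int) + 1) = ((j + 1 : Nat) : Int) := by push_cast; ring
    rw [h1, ih (j + 1) (G d j (j : Int))]
    congr 1
    omega

lemma pv_foldl_counter0 {β : Type} (G : β → Nat → Int → β) (M : Nat) (d : β) :
    ((List.range M).foldl (fun (p : β × Int) k => (G p.1 k p.2, p.2 + 1)) (d, 0))
      = ((List.range M).foldl (fun b k => G b k (k : Int)) d, (M : Int)) := by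
  rw [List.range_eq_range']
  simpa using pv_foldl_counter G M 0 d

lemma pv_chunks (addr s : Int) (n : Nat) (g : Nat → String) (G : Int → Int → String)
    (hG : ∀ c k : Nat, G (c : Int) (k : Int) = g (16 * c + k))
    (key : Int → String) (d0 : PySem.Dict String (List String)) :
    ((PySem.List.pyRange 0 ((n : Int)) 16).foldl
        (fun (p : PySem.Dict String (List String) × Int) i =>
          (p.1.insert (key (addr + 16 * s * p.2)) (PySem.List.slice ((List.range n).map g) (some i) (some (i + 16))), p.2 + 1))
        (d0, 0)).1
      = (PySem.List.pyRange 0 (PySem.Int.floordiv ((n : Int) + 15) 16) 1).foldl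
          (fun fd cnt =>
            fd.insert (key (addr + 16 * s * cnt))
              ((PySem.List.pyRange 0 (min 16 ((n : Int) - 16 * cnt)) 1).map (fun j => G cnt j)))
          d0 := by
  rw [PySem.List.pyRange_of_pos 0 ((n : Int)) (by norm_num : (0:Int) < 16)]
  rw [PySem.Int.floordiv_eq_ediv_of_pos (by norm_num : (0:Int) < 16)]
  rw [PySem.List.pyRange_one]
  have hM : (if (0:Int) < (n : Int) then (((n : Int) - 0 + 16 - 1) / 16).toNat else 0) = (n + 15) / 16 := by
    split <;> omega
  have hM2 : (((n : Int) + 15) / 16 - 0).toNat = (n + 15) / 16 := by omega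
  rw [hM, hM2]
  rw [List.foldl_map, List.foldl_map]
  have hc := pv_foldl_counter0
    (fun d k c => d.insert (key (addr + 16 * s * c))
      (PySem.List.slice ((List.range n).map g) (some (0 + 16 * (k : Int))) (some (0 + 16 * (k : Int) + 16))))
    ((n + 15) / 16) d0
  rw [hc]
  dsimp only
  simp only [zero_add]
  congr 1
  funext d k
  congr 1
  have e0 : (16 * (k : Int)) = ((16 * k : Nat) : Int) := by push_cast; ring
  rw [e0]
  have e1 : (((16 * k : Nat) : Int) + 16) = ((16 * k + 16 : Nat) : Int) := by push_cast; ring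
  rw [e1, PySem.List.slice_natCast]
  have e2 : 16 * k + 16 - 16 * k = 16 := by omega
  rw [e2, ← List.map_drop, ← List.map_take]
  have hd : (List.range n).drop (16 * k) = List.range' (16 * k) (n - 16 * k) := by
    simp [List.range_eq_range']
  rw [hd, pv_take_range', List.range'_eq_map_range, List.map_map]
  rw [PySem.List.pyRange_one, List.map_map]
  have e3 : (min 16 ((n : Int) - ((16 * k : Nat) : Int)) - 0).toNat = min 16 (n - 16 * k) := by omega
  rw [e3]
  congr 1
  funext j
  simp only [Function.comp_apply, zero_add]
  exact (hG k j).symm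

lemma pv_common (addr SZ : Int) (s : Int) (hs : 0 < s)
    (w : Int → String) (G : Int → Int → String)
    (hG : ∀ c k : Nat, G (c : Int) (k : Int) = w (addr + s * ((16 * c + k : Nat) : Int) - addr))
    (d0 : PySem.Dict String (List String)) :
    ((PySem.List.pyRange 0
        ((((PySem.List.pyRange addr (addr + SZ) s).foldl (fun data i => data ++ [w (i - addr)]) []).length : Int)) 16).foldl
        (fun (p : PySem.Dict String (List String) × Int) i =>
          (p.1.insert (pfKey (addr + 16 * s * p.2))
            (PySem.List.slice ((PySem.List.pyRange addr (addr + SZ) s).foldl (fun data i => data ++ [w (i - addr)]) [])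
              (some i) (some (i + 16))), p.2 + 1))
        (d0, 0)).1
      = (PySem.List.pyRange 0
          (PySem.Int.floordiv ((((PySem.List.pyRange addr (addr + SZ) s).length : Int)) + 15) 16) 1).foldl
          (fun fd cnt =>
            fd.insert (pfKey (addr + 16 * s * cnt))
              ((PySem.List.pyRange 0 (min 16 ((((PySem.List.pyRange addr (addr + SZ) s).length : Int)) - 16 * cnt)) 1).map
                (fun j => G cnt j)))
          d0 := by
  have hdata : (PySem.List.pyRange addr (addr + SZ) s).foldl (fun data i => data ++ [w (i - addr)]) []
      = (List.range (PySem.List.pyRange addr (addr + SZ) s).length).map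
          (fun (k : Nat) => w (addr + s * (k : Int) - addr)) := by
    rw [PySem.List.foldl_append_singleton_eq_map, List.nil_append]
    rw [PySem.List.pyRange_of_pos addr (addr + SZ) hs]
    rw [List.map_map, List.length_map, List.length_range]
    rfl
  rw [hdata]
  have hlen : ((List.range (PySem.List.pyRange addr (addr + SZ) s).length).map
      (fun (k : Nat) => w (addr + s * (k : Int) - addr))).length = (PySem.List.pyRange addr (addr + SZ) s).length := by
    simp
  rw [hlen]
  exact pv_chunks addr s (PySem.List.pyRange addr (addr + SZ) s).length
    (fun (k : Nat) => w (addr + s * (k : Int) - addr)) G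
    (fun c k => hG c k) pfKey d0

-- ===== VERDICT (by name: the statement is the Claim_ definition above) =====
theorem parseFlash_spec : Claim_equal_parseFlash := by
  intro flash addr size state default _ _
  unfold Spec_parseFlash
  by_cases h1 : state = 1
  · subst h1
    unfold parseFlash parseFlash_alt
    dsimp only
    rw [show addr + 1024 * size - 1 + 1 = addr + 1024 * size from by ring]
    refine congrArg PySem.Dict.items ?_
    exact pv_common addr (1024 * size) 1 (by norm_num)
      (fun x => pfHex2 (PySem.List.pyGetD (if flash.length = 0 then (PySem.List.pyRange 0 (size * 1024) 1).map (fun _ => default) else flash) x 0))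
      (fun cnt j => PySem.Str.join "" ((PySem.List.pyRange (1 - 1) (-1) (-1)).map (fun b =>
        pfHex2 (PySem.List.pyGetD (if flash.length = 0 then (PySem.List.pyRange 0 (size * 1024) 1).map (fun _ => default) else flash) (16 * 1 * cnt + 1 * j + b) 0))))
      (by
        intro c k
        rw [show PySem.List.pyRange (1 - 1) (-1) (-1) = [0] from by decide]
        simp only [List.map_cons, List.map_nil]
        rw [pv_join_one]
        rw [show (16 * 1 * (c : Int) + 1 * (k : Int) + 0) = addr + 1 * ((16 * c + k : Nat) : Int) - addr from by push_cast; ring])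
      _
  · by_cases h2 : state = 2
    · subst h2
      unfold parseFlash parseFlash_alt
      dsimp only
      rw [show addr + 1024 * size - 1 + 1 = addr + 1024 * size from by ring]
      refine congrArg PySem.Dict.items ?_
      exact pv_common addr (1024 * size) 2 (by norm_num)
        (fun x => pfHex2 (PySem.List.pyGetD (if flash.length = 0 then (PySem.List.pyRange 0 (size * 1024) 1).map (fun _ => default) else flash) (x + 1) 0) ++ pfHex2 (PySem.List.pyGetD (if flash.length = 0 then (PySem.List.pyRange 0 (size * 1024) 1).map (fun _ => default) else flash) x 0))
        (fun cnt j => PySem.Str.join "" ((PySem.List.pyRange (2 - 1) (-1) (-1)).map (fun b =>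
          pfHex2 (PySem.List.pyGetD (if flash.length = 0 then (PySem.List.pyRange 0 (size * 1024) 1).map (fun _ => default) else flash) (16 * 2 * cnt + 2 * j + b) 0))))
        (by
          intro c k
          rw [show PySem.List.pyRange (2 - 1) (-1) (-1) = [1, 0] from by decide]
          simp only [List.map_cons, List.map_nil]
          rw [pv_join_two]
          rw [show (16 * 2 * (c : Int) + 2 * (k : Int) + 1) = addr + 2 * ((16 * c + k : Nat) : Int) - addr + 1 from by push_cast; ring]
          rw [show (16 * 2 * (c : Int) + 2 * (k : Int) + 0) = addr + 2 * ((16 * c + k : Nat) : Int) - addr from by push_cast; ring])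
        _
    · by_cases h4 : state = 4
      · subst h4
        unfold parseFlash parseFlash_alt
        dsimp only
        rw [show addr + 1024 * size - 1 + 1 = addr + 1024 * size from by ring]
        refine congrArg PySem.Dict.items ?_
        exact pv_common addr (1024 * size) 4 (by norm_num)
          (fun x => pfHex2 (PySem.List.pyGetD (if flash.length = 0 then (PySem.List.pyRange 0 (size * 1024) 1).map (fun _ => default) else flash) (x + 3) 0) ++ pfHex2 (PySem.List.pyGetD (if flash.length = 0 then (PySem.List.pyRange 0 (size * 1024) 1).map (fun _ => default) else flash) (x + 2) 0) ++ pfHex2 (PySem.List.pyGetD (if flash.length = 0 then (PySem.List.pyRange 0 (size * 1024) 1).map (fun _ => default) else flash) (x + 1) 0) ++ pfHex2 (PySem.List.pyGetD (if flash.length = 0 then (PySem.List.pyRange 0 (size * 1024) 1).map (fun _ => default) else flash) x 0))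
          (fun cnt j => PySem.Str.join "" ((PySem.List.pyRange (4 - 1) (-1) (-1)).map (fun b =>
            pfHex2 (PySem.List.pyGetD (if flash.length = 0 then (PySem.List.pyRange 0 (size * 1024) 1).map (fun _ => default) else flash) (16 * 4 * cnt + 4 * j + b) 0))))
          (by
            intro c k
            rw [show PySem.List.pyRange (4 - 1) (-1) (-1) = [3, 2, 1, 0] from by decide]
            simp only [List.map_cons, List.map_nil]
            rw [pv_join_four]
            rw [show (16 * 4 * (c : Int) + 4 * (k : Int) + 3) = addr + 4 * ((16 * c + k : Nat) : Int) - addr + 3 from by push_cast; ring]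
            rw [show (16 * 4 * (c : Int) + 4 * (k : Int) + 2) = addr + 4 * ((16 * c + k : Nat) : Int) - addr + 2 from by push_cast; ring]
            rw [show (16 * 4 * (c : Int) + 4 * (k : Int) + 1) = addr + 4 * ((16 * c + k : Nat) : Int) - addr + 1 from by push_cast; ring]
            rw [show (16 * 4 * (c : Int) + 4 * (k : Int) + 0) = addr + 4 * ((16 * c + k : Nat) : Int) - addr from by push_cast; ring])
          _
      · -- state not in {1, 2, 4}: A appends nothing, B skips its chunk loop
        unfold parseFlash parseFlash_alt
        dsimp only
        have b1 : (state == 1) = false := by simp [h1]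
        have b2 : (state == 2) = false := by simp [h2]
        have b4 : (state == 4) = false := by simp [h4]
        simp [b1, b2, b4, show PySem.List.pyRange 0 (0 : Int) 16 = [] from by decide]
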